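-- pv_equiv track=rewrite | github.com/Balogunolalere/revengineer | cookbook/examples/blak_outreach.py | generate_fallback
-- ===== SOURCE A (Python) =====
-- def generate_fallback(candidates: list[dict], like_budget: int, comment_budget: int) -> list[dict]:
--     """Fallback when LLM selection fails: assign ENGAGE to top items within both budgets."""
--     selected = []
--     engage_count = 0
--     like_count = 0
--     for c in candidates:
--         if engage_count < comment_budget and (engage_count + like_count) < like_budget:
--             selected.append(dict(c, action="ENGAGE"))
--             engage_count += 1
--         elif (engage_count + like_count) < like_budget:
--             selected.append(dict(c, action="LIKE"))
--             like_count += 1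
--         else:
--             break
--     return selected
-- ===== SOURCE B (Python) =====
-- def generate_fallback(candidates: list[dict], like_budget: int, comment_budget: int) -> list[dict]:
--     """Fallback when LLM selection fails: assign ENGAGE to top items within both budgets."""
--     total = min(len(candidates), max(like_budget, 0))
--     engage = min(max(comment_budget, 0), total)
--     labels = ["ENGAGE"] * engage + ["LIKE"] * (total - engage)
--     return [dict(c, action=a) for c, a in zip(candidates, labels)]
-- ===== Notes on version B (the rewrite author's own statement) =====
-- stated objective: alternative
-- what changed: Replaces the stateful greedy loop (two counters and a break) by first materialising the action-label sequence from clamped budget arithmetic and then zipping it with the candidates, letting zip truncation do the cutting.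
import Mathlib
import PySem

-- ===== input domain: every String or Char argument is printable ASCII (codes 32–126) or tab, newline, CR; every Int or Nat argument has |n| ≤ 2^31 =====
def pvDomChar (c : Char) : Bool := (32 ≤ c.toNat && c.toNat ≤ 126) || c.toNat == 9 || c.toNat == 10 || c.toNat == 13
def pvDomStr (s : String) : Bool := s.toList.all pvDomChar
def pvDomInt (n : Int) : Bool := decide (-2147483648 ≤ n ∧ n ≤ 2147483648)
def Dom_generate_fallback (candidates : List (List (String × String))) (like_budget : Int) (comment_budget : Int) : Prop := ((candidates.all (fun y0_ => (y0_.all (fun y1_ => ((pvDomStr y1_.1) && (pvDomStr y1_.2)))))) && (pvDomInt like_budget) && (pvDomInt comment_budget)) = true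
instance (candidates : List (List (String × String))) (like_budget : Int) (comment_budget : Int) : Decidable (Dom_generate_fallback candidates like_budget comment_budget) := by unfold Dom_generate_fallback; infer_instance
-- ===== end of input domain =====

-- B replaces A's stateful greedy loop (counters + break) by materialising the action-label
-- sequence from clamped budget arithmetic and zipping it with the candidates; objective: alternative.

-- dict(c, action=a): overwrite "action" in place if present, else append (Python dict-merge semantics)
def pvWithAction (c : List (String × String)) (a : String) : List (String × String) :=
  (PySem.Dict.insert (PySem.Dict.mk c) "action" a).items

-- ===== PORT A =====
-- the for-loop with state (selected, engage_count, like_count) and break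
def pvLoopA (lb cb : Int) : List (List (String × String)) → List (List (String × String)) → Int → Int → List (List (String × String))
  | [], selected, _, _ => selected
  | c :: rest, selected, e, l =>
    if e < cb ∧ e + l < lb then pvLoopA lb cb rest (selected ++ [pvWithAction c "ENGAGE"]) (e + 1) l
    else if e + l < lb then pvLoopA lb cb rest (selected ++ [pvWithAction c "LIKE"]) e (l + 1)
    else selected

def generate_fallback (candidates : List (List (String × String))) (like_budget : Int) (comment_budget : Int) : List (List (String × String)) :=
  pvLoopA like_budget comment_budget candidates [] 0 0

-- ===== PORT B =====
-- labels = ["ENGAGE"]*engage + ["LIKE"]*(total-engage); zip truncates to the label count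
def generate_fallback_alt (candidates : List (List (String × String))) (like_budget : Int) (comment_budget : Int) : List (List (String × String)) :=
  let total : Int := min (candidates.length : Int) (max like_budget 0)
  let engage : Int := min (max comment_budget 0) total
  let labels : List String := List.replicate engage.toNat "ENGAGE" ++ List.replicate (total - engage).toNat "LIKE"
  (candidates.zip labels).map (fun p => pvWithAction p.1 p.2)

-- ===== PRECONDITION & SPEC =====
def Spec_generate_fallback (candidates : List (List (String × String))) (like_budget : Int) (comment_budget : Int) (out : List (List (String × String))) : Prop := out = generate_fallback_alt candidates like_budget comment_budget
instance (candidates : List (List (String × String))) (like_budget : Int) (comment_budget : Int) (out : List (List (String × String))) : Decidable (Spec_generate_fallback candidates like_budget comment_budget out) := by unfold Spec_generate_fallback; infer_instance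

-- ===== CLAIM (what is proved, stated in full; the proofs are below) =====
def Claim_equal_generate_fallback : Prop := ∀ (candidates : List (List (String × String))) (like_budget : Int) (comment_budget : Int), Dom_generate_fallback candidates like_budget comment_budget → Spec_generate_fallback candidates like_budget comment_budget (generate_fallback candidates like_budget comment_budget)

-- ===== LEMMAS AND PROOFS =====

-- proof-only intermediate: A's loop with the counters normalised to remaining budgets
def pvGreedy : List (List (String × String)) → Int → Int → List (List (String × String))
  | [], _, _ => []
  | c :: rest, lb, cb =>
    if 0 < cb ∧ 0 < lb then pvWithAction c "ENGAGE" :: pvGreedy rest (lb - 1) (cb - 1)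
    else if 0 < lb then pvWithAction c "LIKE" :: pvGreedy rest (lb - 1) cb
    else []

lemma pvLoopA_eq_greedy (lb cb : Int) (cs : List (List (String × String)))
    (sel : List (List (String × String))) (e l : Int) :
    pvLoopA lb cb cs sel e l = sel ++ pvGreedy cs (lb - e - l) (cb - e) := by
  induction cs generalizing sel e l with
  | nil => simp [pvLoopA, pvGreedy]
  | cons c rest ih =>
    simp only [pvLoopA, pvGreedy]
    split_ifs with h1 h2 h3 h4 h5 <;> try (exfalso; omega)
    · rw [ih]
      have h' : lb - (e + 1) - l = lb - e - l - 1 := by ring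
      have h'' : cb - (e + 1) = cb - e - 1 := by ring
      simp [h', h'']
    · rw [ih]
      have h' : lb - e - (l + 1) = lb - e - l - 1 := by ring
      simp [h']
    · simp

lemma pvGreedy_zip (cs : List (List (String × String))) (lb cb : Int) (n k : Nat)
    (hn : (n : Int) = min (cs.length : Int) (max lb 0))
    (hk : (k : Int) = min (max cb 0) (n : Int)) :
    pvGreedy cs lb cb =
      (cs.zip (List.replicate k "ENGAGE" ++ List.replicate (n - k) "LIKE")).map
        (fun p => pvWithAction p.1 p.2) := by
  induction cs generalizing lb cb n k with
  | nil =>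
    have hn0 : n = 0 := by simp at hn; omega
    have hk0 : k = 0 := by omega
    subst hn0; subst hk0
    simp [pvGreedy]
  | cons c rest ih =>
    simp only [List.length_cons] at hn
    by_cases h1 : 0 < lb
    · obtain ⟨n', rfl⟩ : ∃ n', n = n' + 1 := ⟨n - 1, by push_cast at hn; omega⟩
      by_cases h2 : 0 < cb
      · obtain ⟨k', rfl⟩ : ∃ k', k = k' + 1 := ⟨k - 1, by push_cast at hn hk; omega⟩
        have hnk : n' + 1 - (k' + 1) = n' - k' := by omega
        simp only [pvGreedy, if_pos (And.intro h2 h1), hnk, List.replicate_succ,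
          List.cons_append, List.zip_cons_cons, List.map_cons]
        refine congrArg _ (ih (lb - 1) (cb - 1) n' k' ?_ ?_) <;> push_cast at hn hk ⊢ <;> omega
      · have hk0 : k = 0 := by push_cast at hk; omega
        subst hk0
        simp only [pvGreedy, h2, false_and, if_false, if_pos h1,
          List.replicate, List.nil_append, List.zip_cons_cons, List.map_cons]
        refine congrArg _ (ih (lb - 1) cb n' 0 ?_ ?_) <;> push_cast at hn hk ⊢ <;> omega
    · have hn0 : n = 0 := by push_cast at hn; omega
      have hk0 : k = 0 := by omega
      subst hn0; subst hk0
      simp [pvGreedy, h1]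

lemma pvAlt_eq_greedy (cs : List (List (String × String))) (lb cb : Int) :
    generate_fallback_alt cs lb cb = pvGreedy cs lb cb := by
  simp only [generate_fallback_alt]
  set total : Int := min (cs.length : Int) (max lb 0) with ht
  set engage : Int := min (max cb 0) total with he
  have h0t : 0 ≤ total := by positivity
  have h0e : 0 ≤ engage ∧ engage ≤ total := by constructor <;> omega
  have hsub : (total - engage).toNat = total.toNat - engage.toNat := by omega
  rw [hsub, pvGreedy_zip cs lb cb total.toNat engage.toNat (by omega) (by omega)]

-- ===== VERDICT (by name: the statement is the Claim_ definition above) =====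
theorem generate_fallback_spec : Claim_equal_generate_fallback := by
  intro candidates like_budget comment_budget _
  show _ = _
  rw [pvAlt_eq_greedy]
  unfold generate_fallback
  rw [pvLoopA_eq_greedy]
  simp
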